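-- pv_equiv track=rewrite | github.com/scipopt/PySCIPOpt | examples/unfinished/cutstock.py | mkCuttingStock
-- ===== SOURCE A (Python) =====
-- def mkCuttingStock(s):
--     """mkCuttingStock: convert a bin packing instance into cutting stock format"""
--     w,q = [],[]   # list of different widths (sizes) of items, their quantities
--     for item in sorted(s):
--         if w == [] or item != w[-1]:
--             w.append(item)
--             q.append(1)
--         else:
--             q[-1] += 1
--     return w,q
-- ===== SOURCE B (Python) =====
-- def mkCuttingStock(s):
--     """mkCuttingStock: convert a bin packing instance into cutting stock format"""
--     counts = {}
--     for item in s: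
--         counts[item] = counts.get(item, 0) + 1
--     w = sorted(counts)
--     q = [counts.get(item, 0) for item in w]
--     return w, q
-- ===== Notes on version B (the rewrite author's own statement) =====
-- stated objective: idiomatic
-- what changed: B builds a frequency dict in one unsorted pass and then emits the sorted distinct widths with their counts, replacing A's sort-then-run-length-encode adjacency scan.
import Mathlib
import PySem

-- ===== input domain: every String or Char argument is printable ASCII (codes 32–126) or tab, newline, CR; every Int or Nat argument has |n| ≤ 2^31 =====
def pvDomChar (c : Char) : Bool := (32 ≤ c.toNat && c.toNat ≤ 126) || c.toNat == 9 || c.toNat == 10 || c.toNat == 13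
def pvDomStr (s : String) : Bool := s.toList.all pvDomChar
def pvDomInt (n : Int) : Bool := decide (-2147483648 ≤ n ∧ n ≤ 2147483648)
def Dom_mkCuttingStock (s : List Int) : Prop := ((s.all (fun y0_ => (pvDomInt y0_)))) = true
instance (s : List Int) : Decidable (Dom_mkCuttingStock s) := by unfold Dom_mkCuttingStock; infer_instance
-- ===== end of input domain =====

-- B replaces A's sort-then-run-length-encode adjacency scan by a frequency dict built in one
-- pass followed by emitting the sorted distinct widths with their counts (idiomatic).


-- ===== PORT A =====
-- loop body: 'if w == [] or item != w[-1]: w.append(item); q.append(1) else: q[-1] += 1'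
-- ('q[-1] += 1' rewrites the last element of the (nonempty) q: dropLast ++ [last + 1])
def mkCSstep (wq : List Int × List Int) (item : Int) : List Int × List Int :=
  if wq.1 = [] ∨ PySem.List.pyGet? wq.1 (-1) ≠ some item then
    (wq.1 ++ [item], wq.2 ++ [1])
  else
    (wq.1, wq.2.dropLast ++ [wq.2.getLast! + 1])

def mkCuttingStock (s : List Int) : List Int × List Int :=
  (PySem.List.sorted s (fun x => x) false).foldl mkCSstep ([], [])

-- ===== PORT B =====
-- counts[item] = counts.get(item, 0) + 1; then w = sorted(counts), q = [counts.get(k, 0) for k in w]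
def mkCuttingStock_alt (s : List Int) : List Int × List Int :=
  let counts : PySem.Dict Int Int :=
    s.foldl (fun d x => d.insert x (d.getD x 0 + 1)) PySem.Dict.empty
  let w := PySem.List.sorted counts.keys (fun x => x) false
  let q := w.map (fun k => counts.getD k 0)
  (w, q)

-- ===== PRECONDITION & SPEC =====
def Spec_mkCuttingStock (s : List Int) (out : List Int × List Int) : Prop := out = mkCuttingStock_alt s
instance (s : List Int) (out : List Int × List Int) : Decidable (Spec_mkCuttingStock s out) := by unfold Spec_mkCuttingStock; infer_instance

-- ===== CLAIM (what is proved, stated in full; the proofs are below) =====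
def Claim_equal_mkCuttingStock : Prop := ∀ (s : List Int), Dom_mkCuttingStock s → Spec_mkCuttingStock s (mkCuttingStock s)

-- ===== LEMMAS AND PROOFS =====

-- abbreviation for A's fold from the empty state
def mkCSrun (l : List Int) : List Int × List Int := l.foldl mkCSstep ([], [])

-- one step on a state with last width a, same item: bump the last count
lemma mkCSstep_same (w q : List Int) (a n : Int) :
    mkCSstep (w ++ [a], q ++ [n]) a = (w ++ [a], q ++ [n + 1]) := by
  simp [mkCSstep, PySem.List.pyGet?_neg_one_append_singleton]

-- one step on a state with last width a, new item x ≠ a: append a fresh group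
lemma mkCSstep_new (w q : List Int) (a n x : Int) (hx : x ≠ a) :
    mkCSstep (w ++ [a], q ++ [n]) x = ((w ++ [a]) ++ [x], (q ++ [n]) ++ [1]) := by
  simp [mkCSstep, PySem.List.pyGet?_neg_one_append_singleton, Ne.symm hx]

-- generalized loop invariant over a nondecreasing remainder whose elements dominate the last width
lemma mkCS_gen (l : List Int) : ∀ (w q : List Int) (a n : Int),
    l.Pairwise (· ≤ ·) → (∀ y ∈ l, a ≤ y) →
    l.foldl mkCSstep (w ++ [a], q ++ [n]) =
      (w ++ a :: (mkCSrun (l.filter (fun y => a < y))).1,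
       q ++ (n + (l.count a : Int)) :: (mkCSrun (l.filter (fun y => a < y))).2) := by
  induction l with
  | nil => intro w q a n _ _; simp [mkCSrun]
  | cons x xs ih =>
    intro w q a n hp hdom
    have hax : a ≤ x := hdom x (by simp)
    have hxs : ∀ y ∈ xs, x ≤ y := (List.pairwise_cons.mp hp).1
    have hp' : xs.Pairwise (· ≤ ·) := (List.pairwise_cons.mp hp).2
    rcases eq_or_lt_of_le hax with heq | hlt
    · subst heq
      have : ¬ (a < a) := lt_irrefl a
      rw [List.foldl_cons, mkCSstep_same, ih w q a (n + 1) hp' hxs]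
      simp
      ring_nf
    · have hxa : x ≠ a := ne_of_gt hlt
      rw [List.foldl_cons, mkCSstep_new w q a n x hxa,
        ih (w ++ [a]) (q ++ [n]) x 1 hp' hxs]
      have hfa : xs.filter (fun y => a < y) = xs :=
        List.filter_eq_self.mpr (fun y hy => decide_eq_true (lt_of_lt_of_le hlt (hxs y hy)))
      have hca : (x :: xs).count a = 0 := by
        rw [List.count_eq_zero]
        intro hmem
        rcases List.mem_cons.mp hmem with h | h
        · exact hxa h.symm
        · exact absurd (hxs a h) (not_le.mpr hlt)
      have hrun : mkCSrun (x :: xs) =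
          (x :: (mkCSrun (xs.filter (fun y => x < y))).1,
           (1 + (xs.count x : Int)) :: (mkCSrun (xs.filter (fun y => x < y))).2) := by
        have h0 : mkCSstep (([], []) : List Int × List Int) x = ([] ++ [x], [] ++ [(1:Int)]) := by
          simp [mkCSstep]
        rw [mkCSrun, List.foldl_cons, h0, ih [] [] x 1 hp' hxs]
        simp
      simp [hlt, hfa, hca, hrun]

-- characterization of A's fold on a nondecreasing list
lemma mkCSrun_spec (l : List Int) (hl : l.Pairwise (· ≤ ·)) :
    (mkCSrun l).1.Perm (PySem.Set.ofList l) ∧ (mkCSrun l).1.Pairwise (· < ·) ∧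
      (mkCSrun l).2 = (mkCSrun l).1.map (fun k => (l.count k : Int)) := by
  induction hN : l.length using Nat.strong_induction_on generalizing l with
  | _ N ih =>
    match l, hl with
    | [], _ => simp [mkCSrun, PySem.Set.ofList]
    | x :: xs, hl =>
      have hxs : ∀ y ∈ xs, x ≤ y := (List.pairwise_cons.mp hl).1
      have hp' : xs.Pairwise (· ≤ ·) := (List.pairwise_cons.mp hl).2
      set m := xs.filter (fun y => x < y) with hm
      have hrun : mkCSrun (x :: xs) =
          (x :: (mkCSrun m).1, (1 + (xs.count x : Int)) :: (mkCSrun m).2) := by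
        have h0 : mkCSstep (([], []) : List Int × List Int) x = ([] ++ [x], [] ++ [(1:Int)]) := by
          simp [mkCSstep]
        rw [mkCSrun, List.foldl_cons, h0, mkCS_gen xs [] [] x 1 hp' hxs, ← hm]
        simp [mkCSrun]
      have hmlen : m.length < N := by
        have h := List.length_filter_le (fun y => x < y) xs
        rw [hm]
        subst hN; simp only [List.length_cons] at *; omega
      have hmp : m.Pairwise (· ≤ ·) := hp'.filter _
      obtain ⟨ihperm, ihlt, ihmap⟩ := ih m.length hmlen m hmp rfl
      have hmemm : ∀ y, y ∈ (mkCSrun m).1 ↔ y ∈ m := by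
        intro y
        rw [ihperm.mem_iff, PySem.Set.mem_ofList]
      have hgt : ∀ y ∈ (mkCSrun m).1, x < y := by
        intro y hy
        have h := (hmemm y).mp hy
        rw [hm] at h
        exact of_decide_eq_true (List.mem_filter.mp h).2
      refine ⟨?_, ?_, ?_⟩
      · have hnd1 : (x :: (mkCSrun m).1).Nodup := by
          refine List.nodup_cons.mpr ⟨?_, ihlt.imp (fun h => ne_of_lt h)⟩
          intro hx
          exact lt_irrefl x (hgt x hx)
        have hnd2 : (PySem.Set.ofList (x :: xs) : List Int).Nodup := PySem.Set.nodup_ofList _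
        rw [hrun]
        refine (List.perm_ext_iff_of_nodup hnd1 hnd2).mpr ?_
        intro y
        rw [PySem.Set.mem_ofList]
        constructor
        · intro h
          rcases List.mem_cons.mp h with h | h
          · exact h ▸ List.mem_cons_self ..
          · have h' := (hmemm y).mp h
            rw [hm] at h'
            exact List.mem_cons_of_mem _ (List.mem_of_mem_filter h')
        · intro h
          rcases List.mem_cons.mp h with h | h
          · exact h ▸ List.mem_cons_self ..
          · by_cases hyx : y = x
            · exact hyx ▸ List.mem_cons_self ..
            · refine List.mem_cons_of_mem _ ((hmemm y).mpr ?_)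
              rw [hm]
              exact List.mem_filter.mpr ⟨h, decide_eq_true (lt_of_le_of_ne (hxs y h) (Ne.symm hyx))⟩
      · rw [hrun]
        exact List.pairwise_cons.mpr ⟨hgt, ihlt⟩
      · rw [hrun]
        simp only [List.map_cons]
        congr 1
        · simp
          omega
        · rw [ihmap]
          refine List.map_congr_left ?_
          intro k hk
          have hkm := (hmemm k).mp hk
          have hkx : x < k := hgt k hk
          have h1 : m.count k = xs.count k := by
            rw [hm, List.count_filter]
            simp [hkx]
          have h2 : (x :: xs).count k = xs.count k := by
            have hne : ¬ (x = k) := ne_of_lt hkx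
            simp [hne]
          rw [h1, h2]

-- ===== VERDICT (by name: the statement is the Claim_ definition above) =====
theorem mkCuttingStock_spec : Claim_equal_mkCuttingStock := by
  intro s _
  unfold Spec_mkCuttingStock mkCuttingStock mkCuttingStock_alt
  have hcounter : s.foldl (fun d x => d.insert x (d.getD x 0 + 1)) PySem.Dict.empty =
      PySem.Dict.counter s := PySem.Dict.foldl_insert_getD_add_one_eq_counter s
  have hp : (PySem.List.sorted s (fun x => x) false).Pairwise (· ≤ ·) :=
    PySem.List.sorted_pairwise s (fun x => x)
  obtain ⟨hperm, hlt, hmap⟩ := mkCSrun_spec (PySem.List.sorted s (fun x => x) false) hp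
  have hperm' : (mkCSrun (PySem.List.sorted s (fun x => x) false)).1.Perm (PySem.Set.ofList s) := by
    refine hperm.trans ?_
    refine (List.perm_ext_iff_of_nodup (PySem.Set.nodup_ofList _) (PySem.Set.nodup_ofList _)).mpr ?_
    intro y
    rw [PySem.Set.mem_ofList, PySem.Set.mem_ofList]
    exact (PySem.List.sorted_perm s (fun x => x) false).mem_iff
  have hw : PySem.List.sorted (PySem.Set.ofList s) (fun x => x) false =
      (mkCSrun (PySem.List.sorted s (fun x => x) false)).1 :=
    PySem.List.sorted_eq_of_perm_of_pairwise_lt _ _ (fun x => x) hperm' hlt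
  have hcnt : ∀ k : Int, (PySem.List.sorted s (fun x => x) false).count k = s.count k :=
    fun k => (PySem.List.sorted_perm s (fun x => x) false).count_eq k
  simp only [hcounter, PySem.Dict.keys_counter, hw, PySem.Dict.getD_counter]
  refine Prod.ext rfl ?_
  show (mkCSrun (PySem.List.sorted s (fun x => x) false)).2 = _
  rw [hmap]
  refine List.map_congr_left ?_
  intro k _
  rw [hcnt k]
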